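-- pv_equiv track=rewrite | github.com/VanHackAcademy/fx-trade | solution.py | maxSellHoldProfit
-- ===== SOURCE A (Python) =====
-- def maxSellHoldProfit(prices: list[int]) -> str:
--   maxHoldProfit = 0
--   maxTrack = 0
--   dayToSell = 0
--   dayToClose = 0
--   for i in range(0, len(prices)):
--     for k in range(i + 1, len(prices)):
--       if prices[i] > prices[k]:
--         maxTrack = max(maxTrack, (prices[i] - prices[k]))
--       if maxTrack >  maxHoldProfit:
--         maxHoldProfit = maxTrack
--         dayToSell = i + 1
--         dayToClose = k + 1
--
--   return {
--     "maxHoldProfit" : maxHoldProfit,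
--     "dayToSell" : dayToSell,
--     "dayToClose" : dayToClose,
--   }
-- ===== SOURCE B (Python) =====
-- def maxSellHoldProfit(prices: list[int]) -> str:
--   # One backward pass: keep (min of the strict suffix, its first index); O(n) instead of O(n^2).
--   best = 0
--   dayToSell = 0
--   dayToClose = 0
--   mo = None  # (min of prices[i+1:], first index of that min)
--   for i in range(len(prices) - 1, -1, -1):
--     x = prices[i]
--     if mo is not None:
--       m, jm = mo
--       cand = x - m
--       if cand > 0 and cand >= best:
--         best = cand
--         dayToSell = i + 1
--         dayToClose = jm + 1
--     if mo is None or x <= mo[0]: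
--       mo = (x, i)
--   return {
--     "maxHoldProfit": best,
--     "dayToSell": dayToSell,
--     "dayToClose": dayToClose,
--   }
-- ===== Notes on version B (the rewrite author's own statement) =====
-- stated objective: faster
-- what changed: Replaced the O(n^2) nested scan over all (i,k) pairs by a single backward pass that maintains the minimum of the strict suffix together with its first index, updating the best profit/day pair on ties toward smaller i, which reproduces A's first-achieving row-major pair.
import Mathlib
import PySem

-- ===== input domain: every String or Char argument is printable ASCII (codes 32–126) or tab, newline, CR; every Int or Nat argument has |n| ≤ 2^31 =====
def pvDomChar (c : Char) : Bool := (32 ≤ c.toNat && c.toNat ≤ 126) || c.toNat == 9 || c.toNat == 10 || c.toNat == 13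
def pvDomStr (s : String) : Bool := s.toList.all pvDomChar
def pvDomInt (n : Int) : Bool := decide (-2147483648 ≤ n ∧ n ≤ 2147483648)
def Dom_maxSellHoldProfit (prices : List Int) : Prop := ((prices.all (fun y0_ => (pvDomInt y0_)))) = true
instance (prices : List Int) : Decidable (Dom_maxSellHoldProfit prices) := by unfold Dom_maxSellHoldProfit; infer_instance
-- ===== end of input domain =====

-- B replaces A's O(n^2) nested pair scan by one O(n) backward pass keeping the strict-suffix minimum and its first index.

-- ===== PORT A =====
-- inner 'for k in range(i+1, len(prices))' loop of A, over the fixed outer index i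
def pvAInner (L : List Int) (i : Int) (st : Int × Int × Int × Int) : Int × Int × Int × Int :=
  (PySem.List.pyRange (i + 1) (L.length : Int) 1).foldl (fun st k =>
    let mt := if PySem.List.pyGetD L i 0 > PySem.List.pyGetD L k 0
              then max st.2.1 (PySem.List.pyGetD L i 0 - PySem.List.pyGetD L k 0) else st.2.1
    if mt > st.1 then (mt, mt, i + 1, k + 1) else (st.1, mt, st.2.2.1, st.2.2.2)) st

def maxSellHoldProfit (prices : List Int) : List (String × Int) :=
  let s := (PySem.List.pyRange 0 (prices.length : Int) 1).foldl
             (fun st i => pvAInner prices i st) (0, 0, 0, 0)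
  [("maxHoldProfit", s.1), ("dayToSell", s.2.2.1), ("dayToClose", s.2.2.2)]

-- ===== PORT B =====
-- body of B's single backward loop: st = (best, dayToSell, dayToClose, mo) where mo = (min of prices[i+1:], its first index)
def pvBStep (L : List Int) (i : Int) (st : Int × Int × Int × Option (Int × Int)) :
    Int × Int × Int × Option (Int × Int) :=
  let x := PySem.List.pyGetD L i 0
  let t : Int × Int × Int :=
    match st.2.2.2 with
    | some (m, jm) => if x - m > 0 ∧ x - m ≥ st.1 then (x - m, i + 1, jm + 1) else (st.1, st.2.1, st.2.2.1)
    | none => (st.1, st.2.1, st.2.2.1)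
  let mo : Option (Int × Int) :=
    match st.2.2.2 with
    | none => some (x, i)
    | some (m, _) => if x ≤ m then some (x, i) else st.2.2.2
  (t.1, t.2.1, t.2.2, mo)

def maxSellHoldProfit_alt (prices : List Int) : List (String × Int) :=
  let s := (PySem.List.pyRange ((prices.length : Int) - 1) (-1) (-1)).foldl
             (fun st i => pvBStep prices i st) (0, 0, 0, none)
  [("maxHoldProfit", s.1), ("dayToSell", s.2.1), ("dayToClose", s.2.2.1)]

-- ===== PRECONDITION & SPEC =====
def Spec_maxSellHoldProfit (prices : List Int) (out : List (String × Int)) : Prop := out = maxSellHoldProfit_alt prices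
instance (prices : List Int) (out : List (String × Int)) : Decidable (Spec_maxSellHoldProfit prices out) := by unfold Spec_maxSellHoldProfit; infer_instance

-- ===== CLAIM (what is proved, stated in full; the proofs are below) =====
def Claim_equal_maxSellHoldProfit : Prop := ∀ (prices : List Int), Dom_maxSellHoldProfit prices → Spec_maxSellHoldProfit prices (maxSellHoldProfit prices)

-- ===== LEMMAS AND PROOFS =====

-- structural versions of A's loops (absolute indices carried along)
def pvRow4 (x iv : Int) : Int → (Int × Int × Int × Int) → List Int → Int × Int × Int × Int
  | _, s, [] => s
  | k, s, y :: ys =>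
      let mt := if x > y then max s.2.1 (x - y) else s.2.1
      pvRow4 x iv (k + 1) (if mt > s.1 then (mt, mt, iv + 1, k + 1) else (s.1, mt, s.2.2.1, s.2.2.2)) ys

def pvA4 : Int → (Int × Int × Int × Int) → List Int → Int × Int × Int × Int
  | _, s, [] => s
  | b, s, x :: xs => pvA4 (b + 1) (pvRow4 x b (b + 1) s xs) xs

-- 3-component version (uses the invariant maxHoldProfit = maxTrack)
def pvRow3 (x iv : Int) : Int → (Int × Int × Int) → List Int → Int × Int × Int
  | _, s, [] => s
  | k, s, y :: ys => pvRow3 x iv (k + 1) (if x - y > s.1 then (x - y, iv + 1, k + 1) else s) ys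

def pvA3 : Int → (Int × Int × Int) → List Int → Int × Int × Int
  | _, s, [] => s
  | b, s, x :: xs => pvA3 (b + 1) (pvRow3 x b (b + 1) s xs) xs

-- one step of B's loop with the element given directly
def pvUpd (x b : Int) (t : Int × Int × Int) : Option (Int × Int) → Int × Int × Int × Option (Int × Int)
  | none => (t.1, t.2.1, t.2.2, some (x, b))
  | some (m, jm) =>
      if x - m > 0 ∧ x - m ≥ t.1
      then (x - m, b + 1, jm + 1, if x ≤ m then some (x, b) else some (m, jm))
      else (t.1, t.2.1, t.2.2, if x ≤ m then some (x, b) else some (m, jm))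

-- structural version of B's backward loop (tail processed first = higher indices first)
def pvCsp : Int → List Int → Int × Int × Int × Option (Int × Int)
  | _, [] => (0, 0, 0, none)
  | b, x :: xs =>
      let st := pvCsp (b + 1) xs
      pvUpd x b (st.1, st.2.1, st.2.2.1) st.2.2.2

-- update of (suffix minimum, first index) by one element on the left
def pvMf2 (x b : Int) : Option (Int × Int) → Option (Int × Int)
  | none => some (x, b)
  | some (m, j) => if x ≤ m then some (x, b) else some (m, j)

-- minimum of a suffix together with the first index attaining it
def pvMf : Int → List Int → Option (Int × Int)
  | _, [] => none
  | b, x :: xs => pvMf2 x b (pvMf (b + 1) xs)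

-- selection of the best pair of a row, given the suffix minimum
def pvSel (s : Int × Int × Int) (x iv : Int) : Option (Int × Int) → Int × Int × Int
  | none => s
  | some (m, jm) => if x - m > s.1 then (x - m, iv + 1, jm + 1) else s

theorem pvBStep_eq (L : List Int) (i : Int) (st : Int × Int × Int × Option (Int × Int)) :
    pvBStep L i st = pvUpd (PySem.List.pyGetD L i 0) i (st.1, st.2.1, st.2.2.1) st.2.2.2 := by
  rcases st with ⟨b1, d1, d2, mo⟩
  rcases mo with _ | ⟨m, jm⟩
  · rfl
  · simp only [pvBStep, pvUpd]
    split_ifs <;> rfl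

theorem pvMf_ne_none (b x : Int) (l : List Int) : pvMf b (x :: l) ≠ none := by
  simp only [pvMf]
  rcases pvMf (b + 1) l with _ | ⟨m, j⟩
  · simp [pvMf2]
  · simp only [pvMf2]
    split_ifs <;> simp

theorem pvCsp_mo (b : Int) (xs : List Int) : (pvCsp b xs).2.2.2 = pvMf b xs := by
  induction xs generalizing b with
  | nil => rfl
  | cons x xs ih =>
      simp only [pvCsp, pvMf, ← ih]
      rcases h : (pvCsp (b + 1) xs).2.2.2 with _ | ⟨m, j⟩ <;> simp only [pvUpd, pvMf2]
      split_ifs <;> rfl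

theorem pvRow3_fst_nonneg (x iv : Int) (k : Int) (s : Int × Int × Int) (ys : List Int)
    (h : 0 ≤ s.1) : 0 ≤ (pvRow3 x iv k s ys).1 := by
  induction ys generalizing k s with
  | nil => exact h
  | cons y ys ih =>
      simp only [pvRow3]
      split_ifs with hc
      · exact ih _ _ (by omega)
      · exact ih _ _ h

theorem pvRow4_eq (x iv : Int) (k : Int) (m ds dc : Int) (ys : List Int) (hm : 0 ≤ m) :
    pvRow4 x iv k (m, m, ds, dc) ys =
      ((pvRow3 x iv k (m, ds, dc) ys).1, (pvRow3 x iv k (m, ds, dc) ys).1,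
       (pvRow3 x iv k (m, ds, dc) ys).2.1, (pvRow3 x iv k (m, ds, dc) ys).2.2) := by
  induction ys generalizing k m ds dc with
  | nil => rfl
  | cons y ys ih =>
      simp only [pvRow4, pvRow3]
      by_cases hd : x - y > m
      · have hxy : x > y := by omega
        have hmax : max m (x - y) = x - y := by omega
        simp only [if_pos hxy, hmax]
        rw [if_pos (by simpa using hd), if_pos hd]
        exact ih _ _ _ _ (by omega)
      · have h1 : (if x > y then max m (x - y) else m) = m := by
          split_ifs with hxy
          · omega
          · rfl
        simp only [h1]
        rw [if_neg (by simp), if_neg hd]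
        exact ih _ _ _ _ hm

theorem pvA4_eq (b : Int) (m ds dc : Int) (xs : List Int) (hm : 0 ≤ m) :
    pvA4 b (m, m, ds, dc) xs =
      ((pvA3 b (m, ds, dc) xs).1, (pvA3 b (m, ds, dc) xs).1,
       (pvA3 b (m, ds, dc) xs).2.1, (pvA3 b (m, ds, dc) xs).2.2) := by
  induction xs generalizing b m ds dc with
  | nil => rfl
  | cons x xs ih =>
      simp only [pvA4, pvA3]
      rw [pvRow4_eq x b (b + 1) m ds dc xs hm]
      have h0 : 0 ≤ (pvRow3 x b (b + 1) (m, ds, dc) xs).1 := pvRow3_fst_nonneg _ _ _ _ _ hm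
      rcases hr : pvRow3 x b (b + 1) (m, ds, dc) xs with ⟨m', ds', dc'⟩
      rw [hr] at h0
      exact ih _ _ _ _ h0

-- characterisation of A's inner row in terms of the suffix minimum
theorem pvRow3_char (ys : List Int) (x iv k : Int) (s : Int × Int × Int) (h : 0 ≤ s.1) :
    pvRow3 x iv k s ys = pvSel s x iv (pvMf k ys) := by
  induction ys generalizing k s with
  | nil => rfl
  | cons y ys ih =>
      simp only [pvRow3, pvMf]
      rcases hmf : pvMf (k + 1) ys with _ | ⟨m', j'⟩
      · have hnil : ys = [] := by
          cases ys with
          | nil => rfl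
          | cons a l => exact absurd hmf (pvMf_ne_none _ _ _)
        subst hnil
        simp only [pvRow3, pvSel, pvMf2]
      · by_cases hyc : x - y > s.1
        · rw [if_pos hyc, ih _ _ (by omega), hmf]
          simp only [pvMf2]
          split_ifs with hy
          all_goals simp only [pvSel]
          all_goals split_ifs <;> first | rfl | (exfalso; omega)
        · rw [if_neg hyc, ih _ _ h, hmf]
          simp only [pvMf2]
          split_ifs with hy
          all_goals simp only [pvSel]
          all_goals split_ifs <;> first | rfl | (exfalso; omega)

-- the triple part of pvCsp is (0,0,0) or strictly positive
theorem pvCsp_pos (b : Int) (xs : List Int) :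
    0 < (pvCsp b xs).1 ∨ ((pvCsp b xs).1 = 0 ∧ (pvCsp b xs).2.1 = 0 ∧ (pvCsp b xs).2.2.1 = 0) := by
  induction xs generalizing b with
  | nil => simp [pvCsp]
  | cons x xs ih =>
      simp only [pvCsp]
      rcases hmo : (pvCsp (b + 1) xs).2.2.2 with _ | ⟨m, jm⟩
      · simp only [pvUpd]
        simpa using ih (b + 1)
      · simp only [pvUpd]
        by_cases hc : x - m > 0 ∧ x - m ≥ (pvCsp (b + 1) xs).1
        · rw [if_pos hc]
          left
          simpa using hc.1
        · rw [if_neg hc]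
          simpa using ih (b + 1)

theorem pvCsp_fst_nonneg (b : Int) (xs : List Int) : 0 ≤ (pvCsp b xs).1 := by
  rcases pvCsp_pos b xs with h | h <;> omega

-- the main equivalence of the two loop strategies
theorem pvA3_eq_csp (xs : List Int) (b : Int) (s : Int × Int × Int) (h : 0 ≤ s.1) :
    pvA3 b s xs =
      (if (pvCsp b xs).1 > s.1 then ((pvCsp b xs).1, (pvCsp b xs).2.1, (pvCsp b xs).2.2.1) else s) := by
  induction xs generalizing b s with
  | nil =>
      simp only [pvA3, pvCsp]
      rw [if_neg (by omega)]
  | cons x xs ih =>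
      simp only [pvA3]
      rw [pvRow3_char xs x b (b + 1) s h]
      have hmo := pvCsp_mo (b + 1) xs
      rcases hm : (pvCsp (b + 1) xs).2.2.2 with _ | ⟨m, jm⟩
      · have hnil : xs = [] := by
          cases xs with
          | nil => rfl
          | cons a l =>
              rw [hmo] at hm
              exact absurd hm (pvMf_ne_none _ _ _)
        subst hnil
        rw [← hmo, hm]
        simp only [pvSel, pvA3, pvCsp, pvUpd]
        rw [if_neg (by omega)]
      · rw [← hmo, hm]
        have hcs : pvCsp b (x :: xs) =
            pvUpd x b ((pvCsp (b + 1) xs).1, (pvCsp (b + 1) xs).2.1, (pvCsp (b + 1) xs).2.2.1)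
              (some (m, jm)) := by
          simp only [pvCsp, hm]
        set T1 := (pvCsp (b + 1) xs).1 with hT1
        set D1 := (pvCsp (b + 1) xs).2.1 with hD1
        set D2 := (pvCsp (b + 1) xs).2.2.1 with hD2
        have hTnn : 0 ≤ T1 := pvCsp_fst_nonneg (b + 1) xs
        simp only [pvSel]
        by_cases hc : x - m > s.1
        · rw [if_pos hc, ih _ _ (by omega)]
          by_cases hT : T1 > x - m
          · rw [if_pos (by simpa using hT)]
            have hni : ¬ (x - m > 0 ∧ x - m ≥ T1) := by omega
            rw [hcs]
            simp only [pvUpd, if_neg hni]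
            rw [if_pos (by simp; omega)]
          · rw [if_neg (by simpa using hT)]
            have hyi : (x - m > 0 ∧ x - m ≥ T1) := by omega
            rw [hcs]
            simp only [pvUpd, if_pos hyi]
            rw [if_pos (by simp; omega)]
        · rw [if_neg hc, ih _ _ h]
          rw [hcs]
          by_cases hcc : x - m > 0 ∧ x - m ≥ T1
          · simp only [pvUpd, if_pos hcc]
            rw [if_neg (by simp; omega), if_neg (by simp; omega)]
          · simp only [pvUpd, if_neg hcc]
            rw [← hT1, ← hD1, ← hD2]

-- ===== conversion of the ports' range folds to the structural recursions =====

theorem pvGetD_here (pre ys : List Int) (x : Int) :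
    PySem.List.pyGetD (pre ++ x :: ys) (pre.length : Int) 0 = x := by
  rw [PySem.List.pyGetD_natCast]
  simp [List.getD_eq_getElem?_getD]

theorem pvRconv (ys : List Int) (es L : List Int) (xv iv k : Int) (s : Int × Int × Int × Int)
    (hL : L = es ++ ys) (hk : k = (es.length : Int)) (hx : PySem.List.pyGetD L iv 0 = xv) :
    List.foldl (fun st (j : ℕ) =>
        (fun st (kk : Int) =>
          let mt := if PySem.List.pyGetD L iv 0 > PySem.List.pyGetD L kk 0
                    then max st.2.1 (PySem.List.pyGetD L iv 0 - PySem.List.pyGetD L kk 0) else st.2.1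
          if mt > st.1 then (mt, mt, iv + 1, kk + 1) else (st.1, mt, st.2.2.1, st.2.2.2)) st (k + (j : Int)))
      s (List.range ys.length)
    = pvRow4 xv iv k s ys := by
  induction ys generalizing es k s with
  | nil => rfl
  | cons y ys ih =>
      have hy : PySem.List.pyGetD L k 0 = y := by
        rw [hk, hL]; exact pvGetD_here es ys y
      rw [List.length_cons, List.range_succ_eq_map, List.foldl_cons, List.foldl_map]
      have harg : (fun (st : Int × Int × Int × Int) (j : ℕ) =>
          (fun st (kk : Int) =>
            let mt := if PySem.List.pyGetD L iv 0 > PySem.List.pyGetD L kk 0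
                      then max st.2.1 (PySem.List.pyGetD L iv 0 - PySem.List.pyGetD L kk 0) else st.2.1
            if mt > st.1 then (mt, mt, iv + 1, kk + 1) else (st.1, mt, st.2.2.1, st.2.2.2)) st (k + (j.succ : Int)))
          = (fun st (j : ℕ) =>
          (fun st (kk : Int) =>
            let mt := if PySem.List.pyGetD L iv 0 > PySem.List.pyGetD L kk 0
                      then max st.2.1 (PySem.List.pyGetD L iv 0 - PySem.List.pyGetD L kk 0) else st.2.1
            if mt > st.1 then (mt, mt, iv + 1, kk + 1) else (st.1, mt, st.2.2.1, st.2.2.2)) st ((k + 1) + (j : Int))) := by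
        funext st j
        have : k + ((j.succ : ℕ) : Int) = (k + 1) + (j : Int) := by push_cast; ring
        rw [this]
      rw [harg]
      rw [ih (es ++ [y]) (k + 1) _ (by simpa using hL) (by simp [hk])]
      simp only [Nat.cast_zero, add_zero, hx, hy, pvRow4]

theorem pvAconv (xs : List Int) (pre : List Int) (s : Int × Int × Int × Int) (L : List Int) (b : Int)
    (hL : L = pre ++ xs) (hb : b = (pre.length : Int)) :
    List.foldl (fun st (i : ℕ) => pvAInner L (b + (i : Int)) st) s (List.range xs.length)
    = pvA4 b s xs := by
  induction xs generalizing pre s b with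
  | nil => rfl
  | cons x xs ih =>
      rw [List.length_cons, List.range_succ_eq_map, List.foldl_cons, List.foldl_map]
      have harg : (fun (st : Int × Int × Int × Int) (j : ℕ) => pvAInner L (b + (j.succ : Int)) st)
          = (fun st (j : ℕ) => pvAInner L ((b + 1) + (j : Int)) st) := by
        funext st j
        have : b + ((j.succ : ℕ) : Int) = (b + 1) + (j : Int) := by push_cast; ring
        rw [this]
      rw [harg]
      rw [ih (pre ++ [x]) _ (b + 1) (by simpa using hL) (by simp [hb])]
      have hlen : ((L.length : Int) - (b + 1)).toNat = xs.length := by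
        have h1 : L.length = pre.length + (xs.length + 1) := by rw [hL]; simp
        rw [h1, hb]; omega
      have hhead : pvAInner L (b + ((0 : ℕ) : Int)) s = pvRow4 x b (b + 1) s xs := by
        rw [Nat.cast_zero, add_zero]
        unfold pvAInner
        rw [PySem.List.pyRange_one, hlen, List.foldl_map]
        exact pvRconv xs (pre ++ [x]) L x b (b + 1) s (by simpa using hL)
          (by simp [hb]) (by rw [hb, hL]; exact pvGetD_here pre xs x)
      rw [hhead]
      rfl

theorem pvBconv (xs : List Int) (pre : List Int) (L : List Int) (b : Int)
    (hL : L = pre ++ xs) (hb : b = (pre.length : Int)) :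
    List.foldr (fun (j : ℕ) st => pvBStep L (b + (j : Int)) st) (0, 0, 0, none) (List.range xs.length)
    = pvCsp b xs := by
  induction xs generalizing pre b with
  | nil => rfl
  | cons x xs ih =>
      rw [List.length_cons, List.range_succ_eq_map, List.foldr_cons, List.foldr_map]
      have harg : (fun (j : ℕ) (st : Int × Int × Int × Option (Int × Int)) => pvBStep L (b + (j.succ : Int)) st)
          = (fun (j : ℕ) st => pvBStep L ((b + 1) + (j : Int)) st) := by
        funext j st
        have : b + ((j.succ : ℕ) : Int) = (b + 1) + (j : Int) := by push_cast; ring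
        rw [this]
      rw [harg]
      rw [ih (pre ++ [x]) (b + 1) (by simpa using hL) (by simp [hb])]
      rw [Nat.cast_zero, add_zero, pvBStep_eq]
      have hx : PySem.List.pyGetD L b 0 = x := by
        rw [hb, hL]; exact pvGetD_here pre xs x
      rw [hx]
      rfl

theorem portA_eq (L : List Int) :
    (PySem.List.pyRange 0 (L.length : Int) 1).foldl (fun st i => pvAInner L i st) (0, 0, 0, 0)
    = pvA4 0 (0, 0, 0, 0) L := by
  rw [PySem.List.pyRange_one, List.foldl_map]
  have : ((L.length : Int) - 0).toNat = L.length := by omega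
  rw [this]
  exact pvAconv L [] (0, 0, 0, 0) L 0 (by simp) (by simp)

theorem portB_eq (L : List Int) :
    (PySem.List.pyRange ((L.length : Int) - 1) (-1) (-1)).foldl (fun st i => pvBStep L i st) (0, 0, 0, none)
    = pvCsp 0 L := by
  rw [PySem.List.pyRange_neg_one_eq_reverse, List.foldl_reverse]
  have h1 : (-1 : Int) + 1 = 0 := by ring
  have h2 : (L.length : Int) - 1 + 1 = (L.length : Int) := by ring
  rw [h1, h2, PySem.List.pyRange_one, List.foldr_map]
  have : ((L.length : Int) - 0).toNat = L.length := by omega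
  rw [this]
  exact pvBconv L [] L 0 (by simp) (by simp)

-- ===== VERDICT (by name: the statement is the Claim_ definition above) =====
theorem maxSellHoldProfit_spec : Claim_equal_maxSellHoldProfit := by
  intro prices _
  unfold Spec_maxSellHoldProfit maxSellHoldProfit maxSellHoldProfit_alt
  rw [portA_eq, portB_eq]
  rw [pvA4_eq 0 0 0 0 prices le_rfl]
  rw [pvA3_eq_csp prices 0 (0, 0, 0) le_rfl]
  rcases pvCsp_pos 0 prices with h | h
  · rw [if_pos (by simpa using h)]
  · rw [if_neg (by simp; omega)]
    simp [h.1, h.2.1, h.2.2]
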